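-- pv_equiv track=rewrite | github.com/sugarete/verarecovery | test/serpent_key_schedule_test.py | sboxes_function
-- ===== SOURCE A (Python) =====
-- def sbox(data_in, sbox_index):
--     """Applies the selected Serpent S-box to a 4-bit input."""
--     sboxes = [sbox0, sbox1, sbox2, sbox3, sbox4, sbox5, sbox6, sbox7]
--     if 0 <= sbox_index <= 7:
--         return sboxes[sbox_index](data_in)
--     else:
--         return 0  # Invalid S-box index
--
-- def sbox0(data_in):
--     # ... (S-box 0 lookup table)
--     return sbox_lookup(data_in, [3, 8, 15, 1, 10, 6, 5, 11, 14, 13, 4, 2, 7, 0, 9, 12])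
--
-- def sbox1(data_in):
--     # ... (S-box 1 lookup table)
--     return sbox_lookup(data_in, [15, 12, 2, 7, 9, 0, 5, 10, 1, 11, 14, 8, 6, 13, 3, 4])
--
-- def sbox2(data_in):
--     return sbox_lookup(data_in, [8, 6, 7, 9, 3, 12, 10, 15, 13, 1, 14, 4, 0, 11, 5, 2])
--
-- def sbox3(data_in):
--     return sbox_lookup(data_in, [0, 15, 11, 8, 12, 9, 6, 3, 13, 1, 2, 4, 7, 5, 10, 14])
--
-- def sbox4(data_in):
--     return sbox_lookup(data_in, [1, 15, 8, 3, 12, 0, 11, 6, 2, 5, 4, 10, 9, 14, 7, 13])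
--
-- def sbox5(data_in):
--     return sbox_lookup(data_in, [15, 5, 2, 11, 4, 10, 9, 12, 0, 3, 14, 8, 13, 6, 7, 1])
--
-- def sbox6(data_in):
--     return sbox_lookup(data_in, [7, 2, 12, 5, 8, 4, 6, 11, 14, 9, 1, 15, 13, 3, 10, 0])
--
-- def sbox7(data_in):
--     return sbox_lookup(data_in, [1, 13, 15, 0, 14, 8, 2, 11, 7, 4, 12, 10, 9, 3, 5, 6])
--
-- def sbox_lookup(data_in, table):
--     """Helper function to perform S-box lookup."""
--     return table[data_in]
--
-- def sboxes_function(w0, w1, w2, w3, i_sbox_index):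
--     """Python equivalent of the sboxes Verilog module."""
--
--     # Apply S-boxes to 4-bit slices
--     sbox_output = []
--     for i in range(32):
--         bit_slice = ((w3 >> i) & 1) << 3 | ((w2 >> i) & 1) << 2 | ((w1 >> i) & 1) << 1 | (w0 >> i) & 1
--         sbox_output.append(sbox(bit_slice, i_sbox_index))
--
--     # Reassemble 32-bit words
--     w0_out = sum((sbox_output[i] & 1) << i for i in range(32))
--     w1_out = sum(((sbox_output[i] >> 1) & 1) << i for i in range(32))
--     w2_out = sum(((sbox_output[i] >> 2) & 1) << i for i in range(32))
--     w3_out = sum(((sbox_output[i] >> 3) & 1) << i for i in range(32))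
--
--     # Combine words into 128-bit output
--     o_data = w0_out | (w1_out << 32) | (w2_out << 64) | (w3_out << 96)
--     return o_data
-- ===== SOURCE B (Python) =====
-- # B: Horner-style recursion consuming the LOW bit of each word per step
-- # (words shifted right by 1 on the recursive call); the four output bits
-- # are placed by plane weights 1, 2**32, 2**64, 2**96 and the recursion
-- # doubles the rest -- no per-position shifts, no intermediate list,
-- # no reassembly passes.
--
-- SBOX_TABLES = [
--     [3, 8, 15, 1, 10, 6, 5, 11, 14, 13, 4, 2, 7, 0, 9, 12],
--     [15, 12, 2, 7, 9, 0, 5, 10, 1, 11, 14, 8, 6, 13, 3, 4],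
--     [8, 6, 7, 9, 3, 12, 10, 15, 13, 1, 14, 4, 0, 11, 5, 2],
--     [0, 15, 11, 8, 12, 9, 6, 3, 13, 1, 2, 4, 7, 5, 10, 14],
--     [1, 15, 8, 3, 12, 0, 11, 6, 2, 5, 4, 10, 9, 14, 7, 13],
--     [15, 5, 2, 11, 4, 10, 9, 12, 0, 3, 14, 8, 13, 6, 7, 1],
--     [7, 2, 12, 5, 8, 4, 6, 11, 14, 9, 1, 15, 13, 3, 10, 0],
--     [1, 13, 15, 0, 14, 8, 2, 11, 7, 4, 12, 10, 9, 3, 5, 6],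
-- ]
--
-- def _go(table, a, b, c, d, k):
--     if k == 0:
--         return 0
--     out = table[(d & 1) << 3 | (c & 1) << 2 | (b & 1) << 1 | a & 1]
--     return (2 * _go(table, a >> 1, b >> 1, c >> 1, d >> 1, k - 1)
--             + (out & 1)
--             + ((out >> 1) & 1) * 2**32
--             + ((out >> 2) & 1) * 2**64
--             + ((out >> 3) & 1) * 2**96)
--
-- def sboxes_function(w0, w1, w2, w3, i_sbox_index):
--     """Serpent bitslice S-box layer over four 32-bit words."""
--     if not (0 <= i_sbox_index <= 7):
--         return 0  # invalid S-box index zeroes the whole output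
--     return _go(SBOX_TABLES[i_sbox_index], w0, w1, w2, w3, 32)
-- ===== Notes on version B (the rewrite author's own statement) =====
-- stated objective: alternative
-- what changed: Replaced A's dispatch through a list of sbox functions, the intermediate 32-element list and the four separate reassembly sum-passes by a Horner-style recursion that consumes the low bit of each word per step (shifting the words right) and places the four S-box output bits arithmetically at plane weights 1, 2^32, 2^64, 2^96 while doubling the rest.
import Mathlib
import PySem

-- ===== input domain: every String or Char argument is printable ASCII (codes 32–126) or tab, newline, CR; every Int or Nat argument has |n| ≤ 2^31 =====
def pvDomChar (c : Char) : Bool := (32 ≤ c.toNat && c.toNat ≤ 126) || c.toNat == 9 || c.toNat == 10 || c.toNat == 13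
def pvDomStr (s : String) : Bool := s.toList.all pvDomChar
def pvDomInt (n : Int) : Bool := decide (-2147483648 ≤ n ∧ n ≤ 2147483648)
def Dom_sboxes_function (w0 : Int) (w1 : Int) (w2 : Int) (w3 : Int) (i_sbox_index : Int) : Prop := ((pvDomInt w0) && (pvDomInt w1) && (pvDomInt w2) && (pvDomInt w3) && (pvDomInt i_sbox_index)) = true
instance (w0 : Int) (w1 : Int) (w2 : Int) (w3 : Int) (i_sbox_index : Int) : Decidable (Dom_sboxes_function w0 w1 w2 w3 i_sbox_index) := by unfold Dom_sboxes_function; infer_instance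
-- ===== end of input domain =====

-- B replaces A's dispatch through a list of S-box functions, the intermediate 32-element
-- list and the four reassembly sum-passes by a Horner-style recursion that consumes the
-- low bit of each word per step and places the output bits arithmetically (alternative).

-- ===== PORT A =====
-- table[data_in]; at every call site data_in is a 4-bit value, in range for the
-- 16-entry tables, so Python never raises here and the `getD 0` default is never used.
def pvSboxLookup (data_in : Int) (table : List Int) : Int :=
  (PySem.List.pyGet? table data_in).getD 0

def pvSbox0 (data_in : Int) : Int := pvSboxLookup data_in [3, 8, 15, 1, 10, 6, 5, 11, 14, 13, 4, 2, 7, 0, 9, 12]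
def pvSbox1 (data_in : Int) : Int := pvSboxLookup data_in [15, 12, 2, 7, 9, 0, 5, 10, 1, 11, 14, 8, 6, 13, 3, 4]
def pvSbox2 (data_in : Int) : Int := pvSboxLookup data_in [8, 6, 7, 9, 3, 12, 10, 15, 13, 1, 14, 4, 0, 11, 5, 2]
def pvSbox3 (data_in : Int) : Int := pvSboxLookup data_in [0, 15, 11, 8, 12, 9, 6, 3, 13, 1, 2, 4, 7, 5, 10, 14]
def pvSbox4 (data_in : Int) : Int := pvSboxLookup data_in [1, 15, 8, 3, 12, 0, 11, 6, 2, 5, 4, 10, 9, 14, 7, 13]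
def pvSbox5 (data_in : Int) : Int := pvSboxLookup data_in [15, 5, 2, 11, 4, 10, 9, 12, 0, 3, 14, 8, 13, 6, 7, 1]
def pvSbox6 (data_in : Int) : Int := pvSboxLookup data_in [7, 2, 12, 5, 8, 4, 6, 11, 14, 9, 1, 15, 13, 3, 10, 0]
def pvSbox7 (data_in : Int) : Int := pvSboxLookup data_in [1, 13, 15, 0, 14, 8, 2, 11, 7, 4, 12, 10, 9, 3, 5, 6]

def pvSboxes : List (Int → Int) := [pvSbox0, pvSbox1, pvSbox2, pvSbox3, pvSbox4, pvSbox5, pvSbox6, pvSbox7]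

-- sboxes[sbox_index](data_in); the index is checked 0..7 first, so the list access
-- is always in range and the `getD` default function is never used.
def pvSbox (data_in : Int) (sbox_index : Int) : Int :=
  if 0 ≤ sbox_index ∧ sbox_index ≤ 7 then
    ((PySem.List.pyGet? pvSboxes sbox_index).getD (fun _ => 0)) data_in
  else 0

-- the loop indices i are 0..31, so `i.toNat` is an exact port of Python's shift by i
def sboxes_function (w0 : Int) (w1 : Int) (w2 : Int) (w3 : Int) (i_sbox_index : Int) : Int :=
  let sbox_output : List Int := List.foldl (fun acc i =>
      acc ++ [pvSbox (PySem.Int.bor (PySem.Int.bor (PySem.Int.bor (PySem.Int.band (w3 >>> (i.toNat : Nat)) 1 <<< (3:Nat)) (PySem.Int.band (w2 >>> (i.toNat : Nat)) 1 <<< (2:Nat))) (PySem.Int.band (w1 >>> (i.toNat : Nat)) 1 <<< (1:Nat))) (PySem.Int.band (w0 >>> (i.toNat : Nat)) 1)) i_sbox_index])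
    [] (PySem.List.pyRange 0 32 1)
  let w0_out := ((PySem.List.pyRange 0 32 1).map (fun i => PySem.Int.band (PySem.List.pyGetD sbox_output i 0) 1 <<< (i.toNat : Nat))).sum
  let w1_out := ((PySem.List.pyRange 0 32 1).map (fun i => PySem.Int.band (PySem.List.pyGetD sbox_output i 0 >>> (1:Nat)) 1 <<< (i.toNat : Nat))).sum
  let w2_out := ((PySem.List.pyRange 0 32 1).map (fun i => PySem.Int.band (PySem.List.pyGetD sbox_output i 0 >>> (2:Nat)) 1 <<< (i.toNat : Nat))).sum
  let w3_out := ((PySem.List.pyRange 0 32 1).map (fun i => PySem.Int.band (PySem.List.pyGetD sbox_output i 0 >>> (3:Nat)) 1 <<< (i.toNat : Nat))).sum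
  PySem.Int.bor (PySem.Int.bor (PySem.Int.bor w0_out (w1_out <<< (32:Nat))) (w2_out <<< (64:Nat))) (w3_out <<< (96:Nat))

-- ===== PORT B =====
def pvSboxTables : List (List Int) :=
  [[3, 8, 15, 1, 10, 6, 5, 11, 14, 13, 4, 2, 7, 0, 9, 12],
   [15, 12, 2, 7, 9, 0, 5, 10, 1, 11, 14, 8, 6, 13, 3, 4],
   [8, 6, 7, 9, 3, 12, 10, 15, 13, 1, 14, 4, 0, 11, 5, 2],
   [0, 15, 11, 8, 12, 9, 6, 3, 13, 1, 2, 4, 7, 5, 10, 14],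
   [1, 15, 8, 3, 12, 0, 11, 6, 2, 5, 4, 10, 9, 14, 7, 13],
   [15, 5, 2, 11, 4, 10, 9, 12, 0, 3, 14, 8, 13, 6, 7, 1],
   [7, 2, 12, 5, 8, 4, 6, 11, 14, 9, 1, 15, 13, 3, 10, 0],
   [1, 13, 15, 0, 14, 8, 2, 11, 7, 4, 12, 10, 9, 3, 5, 6]]

-- _go: the nibble n of low bits is a 4-bit value against a 16-entry table, so the
-- `getD 0` default is never used; Python's arithmetic (+, *, <<, >>, &) is exact here.
def pvGo (table : List Int) (a : Int) (b : Int) (c : Int) (d : Int) : Nat → Int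
  | 0 => 0
  | k + 1 =>
    let out := (PySem.List.pyGet? table (PySem.Int.bor (PySem.Int.bor (PySem.Int.bor (PySem.Int.band d 1 <<< (3:Nat)) (PySem.Int.band c 1 <<< (2:Nat))) (PySem.Int.band b 1 <<< (1:Nat))) (PySem.Int.band a 1))).getD 0
    2 * pvGo table (a >>> (1:Nat)) (b >>> (1:Nat)) (c >>> (1:Nat)) (d >>> (1:Nat)) k
      + PySem.Int.band out 1
      + PySem.Int.band (out >>> (1:Nat)) 1 * 2 ^ 32
      + PySem.Int.band (out >>> (2:Nat)) 1 * 2 ^ 64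
      + PySem.Int.band (out >>> (3:Nat)) 1 * 2 ^ 96

-- i_sbox_index is checked 0..7 first, so the table access is in range and
-- the `getD []` default is never used.
def sboxes_function_alt (w0 : Int) (w1 : Int) (w2 : Int) (w3 : Int) (i_sbox_index : Int) : Int :=
  if 0 ≤ i_sbox_index ∧ i_sbox_index ≤ 7 then
    pvGo ((PySem.List.pyGet? pvSboxTables i_sbox_index).getD []) w0 w1 w2 w3 32
  else 0

-- ===== PRECONDITION & SPEC =====
def Spec_sboxes_function (w0 : Int) (w1 : Int) (w2 : Int) (w3 : Int) (i_sbox_index : Int) (out : Int) : Prop := out = sboxes_function_alt w0 w1 w2 w3 i_sbox_index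
instance (w0 : Int) (w1 : Int) (w2 : Int) (w3 : Int) (i_sbox_index : Int) (out : Int) : Decidable (Spec_sboxes_function w0 w1 w2 w3 i_sbox_index out) := by unfold Spec_sboxes_function; infer_instance

-- ===== CLAIM =====
def Claim_equal_sboxes_function : Prop := ∀ (w0 : Int) (w1 : Int) (w2 : Int) (w3 : Int) (i_sbox_index : Int), Dom_sboxes_function w0 w1 w2 w3 i_sbox_index → Spec_sboxes_function w0 w1 w2 w3 i_sbox_index (sboxes_function w0 w1 w2 w3 i_sbox_index)

-- ===== LEMMAS AND PROOFS =====

-- A's body with the selected S-box abstracted as `s` (definitionally equal to A's body)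
def pvA_core (s : Int → Int) (w0 w1 w2 w3 : Int) : Int :=
  let sbox_output : List Int := List.foldl (fun acc i =>
      acc ++ [s (PySem.Int.bor (PySem.Int.bor (PySem.Int.bor (PySem.Int.band (w3 >>> (i.toNat : Nat)) 1 <<< (3:Nat)) (PySem.Int.band (w2 >>> (i.toNat : Nat)) 1 <<< (2:Nat))) (PySem.Int.band (w1 >>> (i.toNat : Nat)) 1 <<< (1:Nat))) (PySem.Int.band (w0 >>> (i.toNat : Nat)) 1))])
    [] (PySem.List.pyRange 0 32 1)
  let w0_out := ((PySem.List.pyRange 0 32 1).map (fun i => PySem.Int.band (PySem.List.pyGetD sbox_output i 0) 1 <<< (i.toNat : Nat))).sum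
  let w1_out := ((PySem.List.pyRange 0 32 1).map (fun i => PySem.Int.band (PySem.List.pyGetD sbox_output i 0 >>> (1:Nat)) 1 <<< (i.toNat : Nat))).sum
  let w2_out := ((PySem.List.pyRange 0 32 1).map (fun i => PySem.Int.band (PySem.List.pyGetD sbox_output i 0 >>> (2:Nat)) 1 <<< (i.toNat : Nat))).sum
  let w3_out := ((PySem.List.pyRange 0 32 1).map (fun i => PySem.Int.band (PySem.List.pyGetD sbox_output i 0 >>> (3:Nat)) 1 <<< (i.toNat : Nat))).sum
  PySem.Int.bor (PySem.Int.bor (PySem.Int.bor w0_out (w1_out <<< (32:Nat))) (w2_out <<< (64:Nat))) (w3_out <<< (96:Nat))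

def pvNib (w0 w1 w2 w3 : Int) (i : Int) : Int :=
  PySem.Int.bor (PySem.Int.bor (PySem.Int.bor (PySem.Int.band (w3 >>> (i.toNat : Nat)) 1 <<< (3:Nat)) (PySem.Int.band (w2 >>> (i.toNat : Nat)) 1 <<< (2:Nat))) (PySem.Int.band (w1 >>> (i.toNat : Nat)) 1 <<< (1:Nat))) (PySem.Int.band (w0 >>> (i.toNat : Nat)) 1)

def pvBit (x : Int) (j : Nat) : Int := PySem.Int.band (x >>> j) 1

def pvSum (f : Nat → Int) (j k : Nat) : Int := ((List.range k).map (fun i => pvBit (f i) j * 2 ^ i)).sum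

def pvT (f : Nat → Int) (k : Nat) : Int :=
  pvSum f 3 k * 2 ^ 96 + (pvSum f 2 k * 2 ^ 64 + (pvSum f 1 k * 2 ^ 32 + pvSum f 0 k))

-- the Nat → Int function B's recursion evaluates along: the S-box output at bit position n
def pvF (t : List Int) (w0 w1 w2 w3 : Int) (n : Nat) : Int :=
  (PySem.List.pyGet? t (pvNib w0 w1 w2 w3 (Int.ofNat n))).getD 0

lemma pv_shiftRight_zero (x : Int) : x >>> (0 : Nat) = x := by cases x <;> rfl

lemma pv_zero_shiftRight (j : Nat) : (0 : Int) >>> j = 0 := by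
  have h : (0 : Int) >>> j = Int.ofNat (0 >>> j) := rfl
  rw [h, Nat.zero_shiftRight]; rfl

lemma pv_shiftRight_one (x : Int) (n : Nat) : (x >>> (1:Nat)) >>> (n:Nat) = x >>> ((n+1):Nat) := by
  rw [show ((n+1):Nat) = 1 + n by ring, Int.shiftRight_add]

lemma pv_pyRange32 : PySem.List.pyRange 0 32 1 = (List.range 32).map Int.ofNat := by decide

lemma pvBit_nonneg (x : Int) (j : Nat) : 0 ≤ pvBit x j := by
  rw [pvBit, PySem.Int.band_one]; exact PySem.Int.mod_nonneg _ (by norm_num)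

lemma pvBit_le_one (x : Int) (j : Nat) : pvBit x j ≤ 1 := by
  rw [pvBit, PySem.Int.band_one]
  have := PySem.Int.mod_lt (x >>> j) (b := 2) (by norm_num); omega

lemma pvSum_succ (f : Nat → Int) (j k : Nat) :
    pvSum f j (k + 1) = pvSum f j k + pvBit (f k) j * 2 ^ k := by
  simp [pvSum, List.range_succ]

lemma pvSum_nonneg (f : Nat → Int) (j k : Nat) : 0 ≤ pvSum f j k := by
  induction k with
  | zero => simp [pvSum]
  | succ k ih =>
    rw [pvSum_succ]
    have := pvBit_nonneg (f k) j
    positivity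

lemma pvSum_lt (f : Nat → Int) (j k : Nat) : pvSum f j k < 2 ^ k := by
  induction k with
  | zero => simp [pvSum]
  | succ k ih =>
    rw [pvSum_succ]
    have h1 := pvBit_le_one (f k) j
    have hp : (0:Int) < 2 ^ k := by positivity
    have h2 : pvBit (f k) j * 2 ^ k ≤ 2 ^ k := by nlinarith
    calc pvSum f j k + pvBit (f k) j * 2 ^ k < 2 ^ k + 2 ^ k := by linarith
    _ = 2 ^ (k + 1) := by ring

-- head form: peel position 0 off a bit-plane partial sum
lemma pvSum_head (f : Nat → Int) (j k : Nat) :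
    pvSum f j (k + 1) = pvBit (f 0) j + 2 * pvSum (fun n => f (n + 1)) j k := by
  unfold pvSum
  rw [List.range_succ_eq_map, List.map_cons, List.map_map, List.sum_cons]
  have hmap : (List.range k).map ((fun i => pvBit (f i) j * 2 ^ i) ∘ Nat.succ)
      = (List.range k).map (fun i => 2 * (pvBit (f (i + 1)) j * 2 ^ i)) := by
    apply List.map_congr_left
    intro n _
    simp only [Function.comp_apply, Nat.succ_eq_add_one, pow_succ]
    ring
  rw [hmap, List.sum_map_mul_left]
  ring

-- x ||| (y·2^k) = y·2^k + x  when x is a k-bit value and y ≥ 0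
lemma pv_orShiftAdd {x y : Int} {k : Nat} (hx0 : 0 ≤ x) (hxk : x < 2 ^ k) (hy : 0 ≤ y) :
    PySem.Int.bor x (y * 2 ^ k) = y * 2 ^ k + x := by
  have hyk : (0:Int) ≤ y * 2 ^ k := by positivity
  rw [PySem.Int.bor_of_nonneg hx0 hyk]
  have h1 : (y * 2 ^ k).toNat = 2 ^ k * y.toNat := by
    have h : y * 2 ^ k = ((2 ^ k * y.toNat : Nat) : Int) := by
      push_cast [Int.toNat_of_nonneg hy]; ring
    rw [h, Int.toNat_natCast]
  have hxn : x.toNat < 2 ^ k := by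
    have hx' : (x.toNat : Int) < 2 ^ k := by rwa [Int.toNat_of_nonneg hx0]
    exact_mod_cast hx'
  rw [h1, Nat.or_comm, ← Nat.two_pow_add_eq_or_of_lt hxn]
  push_cast [Int.toNat_of_nonneg hx0, Int.toNat_of_nonneg hy]; ring

lemma pv_combine {a b c d : Int}
    (ha0 : 0 ≤ a) (ha : a < 2 ^ 32) (hb0 : 0 ≤ b) (hb : b < 2 ^ 32)
    (hc0 : 0 ≤ c) (hc : c < 2 ^ 32) (hd0 : 0 ≤ d) :
    PySem.Int.bor (PySem.Int.bor (PySem.Int.bor a (b * 2 ^ 32)) (c * 2 ^ 64)) (d * 2 ^ 96)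
      = d * 2 ^ 96 + (c * 2 ^ 64 + (b * 2 ^ 32 + a)) := by
  have h1 : PySem.Int.bor a (b * 2 ^ 32) = b * 2 ^ 32 + a :=
    pv_orShiftAdd (k := 32) ha0 ha hb0
  rw [h1]
  have h2 : PySem.Int.bor (b * 2 ^ 32 + a) (c * 2 ^ 64) = c * 2 ^ 64 + (b * 2 ^ 32 + a) := by
    have hx0 : (0:Int) ≤ b * 2 ^ 32 + a := by positivity
    have hx : b * 2 ^ 32 + a < 2 ^ 64 := by nlinarith
    exact pv_orShiftAdd (k := 64) hx0 hx hc0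
  rw [h2]
  have hx0 : (0:Int) ≤ c * 2 ^ 64 + (b * 2 ^ 32 + a) := by positivity
  have hx : c * 2 ^ 64 + (b * 2 ^ 32 + a) < 2 ^ 96 := by nlinarith
  exact pv_orShiftAdd (k := 96) hx0 hx hd0

lemma pv_index (g : Int → Int) (j : Nat) (hj : j < 32) :
    PySem.List.pyGetD (((List.range 32).map Int.ofNat).map g) (Int.ofNat j) 0 = g (Int.ofNat j) := by
  rw [List.map_map]
  rw [show Int.ofNat j = ((j : Nat) : Int) from rfl, PySem.List.pyGetD_natCast,
      List.getD_eq_getElem _ _ (by simpa using hj),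
      List.getElem_map, List.getElem_range]
  rfl

lemma pvSum_congr {f g : Nat → Int} (h : ∀ n, f n = g n) (jj k : Nat) :
    pvSum f jj k = pvSum g jj k := by
  unfold pvSum
  exact congrArg List.sum (List.map_congr_left (fun n _ => by rw [h n]))

lemma pvT_congr {f g : Nat → Int} (h : ∀ n, f n = g n) (k : Nat) : pvT f k = pvT g k := by
  unfold pvT
  rw [pvSum_congr h 3 k, pvSum_congr h 2 k, pvSum_congr h 1 k, pvSum_congr h 0 k]

lemma pv_plane_gen (u : Nat → Int) (jj : Nat) (L : List Int)
    (hL : ∀ n : Nat, n < 32 → PySem.List.pyGetD L (Int.ofNat n) 0 = u n) :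
    ((((List.range 32).map Int.ofNat).map (fun i => PySem.Int.band (PySem.List.pyGetD L i 0 >>> jj) 1 <<< (i.toNat : Nat))).sum : Int)
      = pvSum u jj 32 := by
  rw [pvSum, List.map_map]
  apply congrArg List.sum
  apply List.map_congr_left
  intro n hn
  have hn' : n < 32 := List.mem_range.mp hn
  simp only [Function.comp_apply]
  rw [hL n hn']
  simp [pvBit, Int.shiftLeft_eq, Int.ofNat_eq_natCast, Int.toNat_natCast]

lemma pv_plane_gen0 (u : Nat → Int) (L : List Int)
    (hL : ∀ n : Nat, n < 32 → PySem.List.pyGetD L (Int.ofNat n) 0 = u n) :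
    ((((List.range 32).map Int.ofNat).map (fun i => PySem.Int.band (PySem.List.pyGetD L i 0) 1 <<< (i.toNat : Nat))).sum : Int)
      = pvSum u 0 32 := by
  rw [pvSum, List.map_map]
  apply congrArg List.sum
  apply List.map_congr_left
  intro n hn
  have hn' : n < 32 := List.mem_range.mp hn
  simp only [Function.comp_apply]
  rw [hL n hn']
  simp [pvBit, Int.shiftLeft_eq, Int.ofNat_eq_natCast, Int.toNat_natCast]

set_option maxHeartbeats 1000000 in
lemma pvA_eval (s : Int → Int) (w0 w1 w2 w3 : Int) :
    pvA_core s w0 w1 w2 w3 = pvT (fun n => s (pvNib w0 w1 w2 w3 (Int.ofNat n))) 32 := by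
  simp only [pvA_core]
  rw [pv_pyRange32, PySem.List.foldl_append_singleton_eq_map, List.nil_append]
  rw [pv_plane_gen0 _ _ (fun n hn => pv_index _ n hn),
      pv_plane_gen _ 1 _ (fun n hn => pv_index _ n hn),
      pv_plane_gen _ 2 _ (fun n hn => pv_index _ n hn),
      pv_plane_gen _ 3 _ (fun n hn => pv_index _ n hn)]
  simp only [Int.shiftLeft_eq]
  rw [pv_combine (pvSum_nonneg _ 0 32) (pvSum_lt _ 0 32) (pvSum_nonneg _ 1 32) (pvSum_lt _ 1 32)
      (pvSum_nonneg _ 2 32) (pvSum_lt _ 2 32) (pvSum_nonneg _ 3 32)]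
  exact pvT_congr (fun n => by simp [pvNib, Int.shiftLeft_eq]) 32

-- shifting all four words right by one shifts pvF by one position
lemma pvF_shift (t : List Int) (w0 w1 w2 w3 : Int) (n : Nat) :
    pvF t (w0 >>> (1:Nat)) (w1 >>> (1:Nat)) (w2 >>> (1:Nat)) (w3 >>> (1:Nat)) n
      = pvF t w0 w1 w2 w3 (n + 1) := by
  unfold pvF pvNib
  rw [show ((Int.ofNat n).toNat : Nat) = n from rfl,
      show ((Int.ofNat (n+1)).toNat : Nat) = n + 1 from rfl,
      pv_shiftRight_one w0 n, pv_shiftRight_one w1 n, pv_shiftRight_one w2 n,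
      pv_shiftRight_one w3 n]

-- B's recursion computes the four bit-plane partial sums at their plane weights
lemma pvGo_eval (t : List Int) : ∀ (k : Nat) (w0 w1 w2 w3 : Int),
    pvGo t w0 w1 w2 w3 k = pvT (pvF t w0 w1 w2 w3) k := by
  intro k
  induction k with
  | zero => intro w0 w1 w2 w3; simp [pvGo, pvT, pvSum]
  | succ k ih =>
    intro w0 w1 w2 w3
    show (let out := (PySem.List.pyGet? t (PySem.Int.bor (PySem.Int.bor (PySem.Int.bor (PySem.Int.band w3 1 <<< (3:Nat)) (PySem.Int.band w2 1 <<< (2:Nat))) (PySem.Int.band w1 1 <<< (1:Nat))) (PySem.Int.band w0 1))).getD 0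
      2 * pvGo t (w0 >>> (1:Nat)) (w1 >>> (1:Nat)) (w2 >>> (1:Nat)) (w3 >>> (1:Nat)) k
        + PySem.Int.band out 1
        + PySem.Int.band (out >>> (1:Nat)) 1 * 2 ^ 32
        + PySem.Int.band (out >>> (2:Nat)) 1 * 2 ^ 64
        + PySem.Int.band (out >>> (3:Nat)) 1 * 2 ^ 96) = _
    rw [ih]
    rw [pvT_congr (pvF_shift t w0 w1 w2 w3) k]
    have hout : (PySem.List.pyGet? t (PySem.Int.bor (PySem.Int.bor (PySem.Int.bor (PySem.Int.band w3 1 <<< (3:Nat)) (PySem.Int.band w2 1 <<< (2:Nat))) (PySem.Int.band w1 1 <<< (1:Nat))) (PySem.Int.band w0 1))).getD 0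
        = pvF t w0 w1 w2 w3 0 := by
      unfold pvF pvNib
      rw [show ((Int.ofNat 0).toNat : Nat) = 0 from rfl,
          pv_shiftRight_zero, pv_shiftRight_zero, pv_shiftRight_zero, pv_shiftRight_zero]
    simp only [hout]
    have hb0 : PySem.Int.band (pvF t w0 w1 w2 w3 0) 1 = pvBit (pvF t w0 w1 w2 w3 0) 0 := by
      rw [pvBit, pv_shiftRight_zero]
    have hbj : ∀ j : Nat, PySem.Int.band (pvF t w0 w1 w2 w3 0 >>> j) 1
        = pvBit (pvF t w0 w1 w2 w3 0) j := fun _ => rfl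
    rw [hb0, hbj 1, hbj 2, hbj 3]
    unfold pvT
    rw [pvSum_head _ 0 k, pvSum_head _ 1 k, pvSum_head _ 2 k, pvSum_head _ 3 k]
    ring

lemma pvT_zero (k : Nat) : pvT (fun _ => (0 : Int)) k = 0 := by
  have hb : ∀ j : Nat, pvBit 0 j = 0 := by
    intro j
    rw [pvBit, pv_zero_shiftRight]
    decide
  have hs : ∀ j : Nat, pvSum (fun _ => (0:Int)) j k = 0 := by
    intro j
    induction k with
    | zero => simp [pvSum]
    | succ k ih => rw [pvSum_succ, ih, hb]; ring
  simp [pvT, hs]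

set_option maxHeartbeats 1000000 in
lemma pv_main_pos (w0 w1 w2 w3 idx : Int) (t : List Int)
    (hs : ∀ d, pvSbox d idx = (PySem.List.pyGet? t d).getD 0)
    (hcond : 0 ≤ idx ∧ idx ≤ 7)
    (htbl : (PySem.List.pyGet? pvSboxTables idx).getD [] = t) :
    sboxes_function w0 w1 w2 w3 idx = sboxes_function_alt w0 w1 w2 w3 idx := by
  have hA : sboxes_function w0 w1 w2 w3 idx = pvA_core (fun d => pvSbox d idx) w0 w1 w2 w3 := rfl
  have hB : sboxes_function_alt w0 w1 w2 w3 idx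
      = if 0 ≤ idx ∧ idx ≤ 7 then pvGo ((PySem.List.pyGet? pvSboxTables idx).getD []) w0 w1 w2 w3 32 else 0 := rfl
  rw [hA, hB, if_pos hcond, htbl, pvA_eval, pvGo_eval]
  exact pvT_congr (fun n => hs _) 32

-- ===== VERDICT (by name: the statement is the Claim_ definition above) =====
set_option maxHeartbeats 1000000 in
theorem sboxes_function_spec : Claim_equal_sboxes_function := by
  intro w0 w1 w2 w3 idx _
  unfold Spec_sboxes_function
  by_cases h : 0 ≤ idx ∧ idx ≤ 7
  · obtain ⟨h1, h2⟩ := h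
    have hcases : idx = 0 ∨ idx = 1 ∨ idx = 2 ∨ idx = 3 ∨ idx = 4 ∨ idx = 5 ∨ idx = 6 ∨ idx = 7 := by omega
    rcases hcases with h | h | h | h | h | h | h | h <;> subst h <;>
      exact pv_main_pos _ _ _ _ _ _ (fun _ => rfl) ⟨by decide, by decide⟩ rfl
  · have hA : sboxes_function w0 w1 w2 w3 idx = pvA_core (fun d => pvSbox d idx) w0 w1 w2 w3 := rfl
    have hB : sboxes_function_alt w0 w1 w2 w3 idx
        = if 0 ≤ idx ∧ idx ≤ 7 then pvGo ((PySem.List.pyGet? pvSboxTables idx).getD []) w0 w1 w2 w3 32 else 0 := rfl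
    rw [hA, hB, if_neg h, pvA_eval]
    have hz : ∀ i : Nat, pvSbox (pvNib w0 w1 w2 w3 (Int.ofNat i)) idx = 0 := by
      intro i; rw [pvSbox, if_neg h]
    rw [pvT_congr (fun i => hz i) 32, pvT_zero]
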